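-- pv_equiv track=rewrite | github.com/sohams-MASS/X-CAVATE | xcavate/core/gap_closure.py | _remove_redundant_single_node_passes
-- ===== SOURCE A (Python) =====
-- from typing import Dict, List, Optional, Tuple
--
-- def _remove_redundant_single_node_passes(
--     print_passes: Dict[int, List[int]],
--     arbitrary_val: int,
-- ) -> Dict[int, List[int]]:
--     """Mark single-node passes as artifacts if their node appears elsewhere.
--
--     After condition 0 appending, a single-node pass may now have its node
--     printed in a different pass.  Mark such passes with
--     ``[arbitrary_val, arbitrary_val]`` for later removal.
--     """
--     for i in print_passes:
--         if len(print_passes[i]) == 1: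
--             node = print_passes[i][0]
--             # Check previous passes
--             for j in range(0, i):
--                 if node in print_passes[j]:
--                     print_passes[i] = [arbitrary_val, arbitrary_val]
--                     break
--             # Check subsequent passes (only if not already marked)
--             if print_passes[i][0] != arbitrary_val:
--                 for k in range(i + 1, len(print_passes)):
--                     if node in print_passes[k]:
--                         print_passes[i] = [arbitrary_val, arbitrary_val]
--                         break
--
--     return print_passes
-- ===== SOURCE B (Python) =====
-- from typing import Dict, List
--
-- def _remove_redundant_single_node_passes(
--     print_passes: Dict[int, List[int]],
--     arbitrary_val: int,
-- ) -> Dict[int, List[int]]: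
--     """One pass of precomputation instead of per-pass rescans.
--
--     A single-node pass ends up marked exactly when its node occurs in some
--     pass of other length, or when it is not the last single-node pass
--     carrying that node.
--     """
--     in_multi = set()
--     last_single = {}
--     for key, nodes in print_passes.items():
--         if len(nodes) == 1:
--             last_single[nodes[0]] = key
--         else:
--             in_multi.update(nodes)
--     return {
--         key: [arbitrary_val, arbitrary_val]
--         if len(nodes) == 1
--         and (nodes[0] in in_multi or last_single[nodes[0]] != key)
--         else nodes
--         for key, nodes in print_passes.items()
--     }
-- ===== Notes on version B (the rewrite author's own statement) =====
-- stated objective: alternative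
-- what changed: Instead of rescanning all previous and subsequent passes for every single-node pass, B builds in one pass the set of nodes occurring in non-single passes and the last key of each single-node value, then marks a single-node pass iff its node is in that set or it is not the last single-node pass with that node.
-- outside the precondition, e.g. on _remove_redundant_single_node_passes({0: [7], 1: [7, 7]}, 7): A returns {0: [7], 1: [7, 7]}, B returns {0: [7, 7], 1: [7, 7]}; on _remove_redundant_single_node_passes({0: [2, 3], 5: [2]}, 9): A returns {0: [2, 3], 5: [9, 9]}, B returns {0: [2, 3], 5: [9, 9]}
import Mathlib
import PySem

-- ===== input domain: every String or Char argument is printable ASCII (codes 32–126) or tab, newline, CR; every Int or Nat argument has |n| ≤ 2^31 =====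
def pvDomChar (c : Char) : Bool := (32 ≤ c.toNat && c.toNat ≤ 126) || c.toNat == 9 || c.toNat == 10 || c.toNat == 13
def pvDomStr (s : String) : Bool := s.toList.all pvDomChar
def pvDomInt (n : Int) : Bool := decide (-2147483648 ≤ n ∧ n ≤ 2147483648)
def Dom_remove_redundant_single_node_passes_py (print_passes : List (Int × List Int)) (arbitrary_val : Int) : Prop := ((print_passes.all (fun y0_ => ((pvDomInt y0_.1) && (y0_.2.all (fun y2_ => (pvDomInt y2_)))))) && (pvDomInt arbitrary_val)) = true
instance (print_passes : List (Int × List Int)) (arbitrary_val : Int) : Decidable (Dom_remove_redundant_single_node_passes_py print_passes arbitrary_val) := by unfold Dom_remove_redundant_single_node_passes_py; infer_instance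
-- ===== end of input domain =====

-- B replaces A's per-pass rescans of all other passes by one precomputation pass (a set of nodes
-- in non-single passes and the last key per single-node value); objective: alternative.
-- A mutates its dict argument in place and returns it; B builds a fresh dict — the equivalence
-- proved here is about the RETURN value only.

-- ===== PORT A =====
-- body of A's outer 'for i in print_passes' loop (marking with break = 'any' over the scanned ranges)
def stepA (arbitrary_val : Int) (d : PySem.Dict Int (List Int)) (i : Int) : PySem.Dict Int (List Int) :=
  if (PySem.Dict.getD d i []).length = 1 then
    let node := (PySem.Dict.getD d i []).headD 0
    let d1 := if (PySem.List.pyRange 0 i 1).any (fun j => (PySem.Dict.getD d j []).contains node)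
              then PySem.Dict.insert d i [arbitrary_val, arbitrary_val] else d
    if (PySem.Dict.getD d1 i []).headD 0 ≠ arbitrary_val then
      (if (PySem.List.pyRange (i + 1) (PySem.Dict.size d1) 1).any
            (fun k => (PySem.Dict.getD d1 k []).contains node)
       then PySem.Dict.insert d1 i [arbitrary_val, arbitrary_val] else d1)
    else d1
  else d

def remove_redundant_single_node_passes_py (print_passes : List (Int × List Int)) (arbitrary_val : Int) : List (Int × List Int) :=
  ((PySem.Dict.keys (PySem.Dict.mk print_passes)).foldl (stepA arbitrary_val) (PySem.Dict.mk print_passes)).items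

-- ===== PORT B =====
-- body of B's precomputation loop: (in_multi, last_single)
def stepB (st : PySem.Set Int × PySem.Dict Int Int) (p : Int × List Int) : PySem.Set Int × PySem.Dict Int Int :=
  if p.2.length = 1 then (st.1, PySem.Dict.insert st.2 (p.2.headD 0) p.1)
  else (PySem.Set.update st.1 p.2, st.2)

def remove_redundant_single_node_passes_py_alt (print_passes : List (Int × List Int)) (arbitrary_val : Int) : List (Int × List Int) :=
  let acc := print_passes.foldl stepB (PySem.Set.empty, PySem.Dict.empty)
  print_passes.map (fun p =>
    if p.2.length = 1 &&
       (PySem.Set.contains acc.1 (p.2.headD 0) || PySem.Dict.get? acc.2 (p.2.headD 0) != some p.1)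
    then (p.1, [arbitrary_val, arbitrary_val]) else p)

-- ===== PRECONDITION & SPEC =====
-- Pre_ restricts to the function's natural domain: no pass already equals the sentinel pair
-- [arbitrary_val] (arbitrary_val is a marker by the function's contract; when it occurs as a real
-- single node A's marking collides with data and either behaviour is accidental), and either the
-- keys are the consecutive pass indices 0..n-1 in order (A indexes other passes by 'range(0, i)' /
-- 'range(i+1, len(...))' and generally raises KeyError on other key sets once a single-node pass
-- is scanned), or there is no single-node pass at all (then A never indexes and returns the dict
-- unchanged whatever the distinct keys are).
def Pre_remove_redundant_single_node_passes_py (print_passes : List (Int × List Int)) (arbitrary_val : Int) : Prop :=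
  (∀ p ∈ print_passes, p.2 ≠ [arbitrary_val]) ∧
  (print_passes.map Prod.fst = (List.range print_passes.length).map (fun (t : Nat) => (t : Int)) ∨
   ((print_passes.map Prod.fst).Nodup ∧ ∀ p ∈ print_passes, p.2.length ≠ 1))
instance (print_passes : List (Int × List Int)) (arbitrary_val : Int) : Decidable (Pre_remove_redundant_single_node_passes_py print_passes arbitrary_val) := by unfold Pre_remove_redundant_single_node_passes_py; infer_instance

def pvWitness_remove_redundant_single_node_passes_py : (List (Int × List Int)) × Int :=
  ([(0, [1]), (1, [1, 2]), (2, [1])], -1)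

def Spec_remove_redundant_single_node_passes_py (print_passes : List (Int × List Int)) (arbitrary_val : Int) (out : List (Int × List Int)) : Prop := out = remove_redundant_single_node_passes_py_alt print_passes arbitrary_val
instance (print_passes : List (Int × List Int)) (arbitrary_val : Int) (out : List (Int × List Int)) : Decidable (Spec_remove_redundant_single_node_passes_py print_passes arbitrary_val out) := by unfold Spec_remove_redundant_single_node_passes_py; infer_instance

-- ===== CLAIM (what is proved, stated in full; the proofs are below) =====
def Claim_equal_remove_redundant_single_node_passes_py : Prop := ∀ (print_passes : List (Int × List Int)) (arbitrary_val : Int), Dom_remove_redundant_single_node_passes_py print_passes arbitrary_val → Pre_remove_redundant_single_node_passes_py print_passes arbitrary_val → Spec_remove_redundant_single_node_passes_py print_passes arbitrary_val (remove_redundant_single_node_passes_py print_passes arbitrary_val)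

-- ===== LEMMAS AND PROOFS =====

-- the original value list of pass t
def pvOrig (pp : List (Int × List Int)) (t : Nat) : List Int := (pp.map Prod.snd).getD t []
-- v occurs in some pass of length ≠ 1
def pvMulti (pp : List (Int × List Int)) (v : Int) : Bool :=
  pp.any (fun p => p.2.length != 1 && p.2.contains v)
-- some pass after t is exactly [v]
def pvLater (pp : List (Int × List Int)) (t : Nat) (v : Int) : Bool :=
  (List.range pp.length).any (fun u => decide (t < u) && (pvOrig pp u == [v]))
-- the marking condition both programs compute for pass t
def pvMark (pp : List (Int × List Int)) (t : Nat) : Bool :=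
  ((pvOrig pp t).length == 1) &&
    (pvMulti pp ((pvOrig pp t).headD 0) || pvLater pp t ((pvOrig pp t).headD 0))
-- value of pass t after the first m passes have been processed
def pvVal (pp : List (Int × List Int)) (arb : Int) (m t : Nat) : List Int :=
  if pvMark pp t && decide (t < m) then [arb, arb] else pvOrig pp t
-- the whole dict after the first m passes have been processed
def pvSpec (pp : List (Int × List Int)) (arb : Int) (m : Nat) : List (Int × List Int) :=
  (List.range pp.length).map (fun (t : Nat) => ((t : Int), pvVal pp arb m t))

theorem pv_len_one {l : List Int} (h : l.length = 1) : l = [l.headD 0] := by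
  match l, h with | [a], _ => rfl

theorem pv_nodup_cast_range (n : Nat) : ((List.range n).map (fun (t : Nat) => (t : Int))).Nodup :=
  (List.nodup_range).map (fun _ _ h => by exact_mod_cast h)

theorem pv_orig_eq {pp : List (Int × List Int)} {t : Nat} (ht : t < pp.length) :
    pvOrig pp t = pp[t].2 := by
  simp [pvOrig, List.getD_eq_getElem?_getD, ht]

theorem pv_orig_mem {pp : List (Int × List Int)} {t : Nat} (ht : t < pp.length) :
    ∃ p ∈ pp, p.2 = pvOrig pp t := ⟨pp[t], List.getElem_mem ht, (pv_orig_eq ht).symm⟩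

theorem pv_mem_orig {pp : List (Int × List Int)} {p : Int × List Int} (hp : p ∈ pp) :
    ∃ t, t < pp.length ∧ pvOrig pp t = p.2 := by
  obtain ⟨t, ht, rfl⟩ := List.mem_iff_getElem.mp hp
  exact ⟨t, ht, pv_orig_eq ht⟩

theorem pv_pp_eq {pp : List (Int × List Int)}
    (hk : pp.map Prod.fst = (List.range pp.length).map (fun (t : Nat) => (t : Int))) :
    pp = (List.range pp.length).map (fun (t : Nat) => ((t : Int), pvOrig pp t)) := by
  apply List.ext_getElem (by simp)
  intro t ht ht'
  have hfst : pp[t].1 = (t : Int) := by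
    have := List.getElem_of_eq hk (i := t) (by simpa using ht)
    simpa using this
  have : t < pp.length := by simpa using ht
  refine Prod.ext ?_ ?_
  · simpa using hfst
  · simpa using (pv_orig_eq this).symm

-- ---------- B side ----------

theorem pv_foldB_fst (pp : List (Int × List Int)) (s : PySem.Set Int) (d : PySem.Dict Int Int) :
    (pp.foldl stepB (s, d)).1
      = pp.foldl (fun s p => if p.2.length = 1 then s else PySem.Set.update s p.2) s := by
  induction pp generalizing s d with
  | nil => rfl
  | cons p pp ih =>
    simp only [List.foldl_cons, stepB]
    split <;> simp [ih]

theorem pv_foldB_snd (pp : List (Int × List Int)) (s : PySem.Set Int) (d : PySem.Dict Int Int) :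
    (pp.foldl stepB (s, d)).2
      = pp.foldl (fun d p => if p.2.length = 1 then PySem.Dict.insert d (p.2.headD 0) p.1 else d) d := by
  induction pp generalizing s d with
  | nil => rfl
  | cons p pp ih =>
    simp only [List.foldl_cons, stepB]
    split <;> simp [ih]

theorem pv_mem_foldSet (pp : List (Int × List Int)) (s : PySem.Set Int) (v : Int) :
    v ∈ pp.foldl (fun s p => if p.2.length = 1 then s else PySem.Set.update s p.2) s
      ↔ v ∈ s ∨ ∃ p ∈ pp, p.2.length ≠ 1 ∧ v ∈ p.2 := by
  induction pp generalizing s with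
  | nil => simp
  | cons p pp ih =>
    simp only [List.foldl_cons]
    split
    · rw [ih]; constructor
      · rintro (h | h)
        · exact Or.inl h
        · exact Or.inr (by obtain ⟨q, hq, h1, h2⟩ := h; exact ⟨q, List.mem_cons_of_mem _ hq, h1, h2⟩)
      · rintro (h | ⟨q, hq, h1, h2⟩)
        · exact Or.inl h
        · rcases List.mem_cons.mp hq with rfl | hq
          · omega
          · exact Or.inr ⟨q, hq, h1, h2⟩
    · rw [ih]
      rw [PySem.Set.mem_update]
      constructor
      · rintro ((h | h) | h)
        · exact Or.inl h
        · exact Or.inr ⟨p, List.mem_cons_self .., by assumption, h⟩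
        · exact Or.inr (by obtain ⟨q, hq, h1, h2⟩ := h; exact ⟨q, List.mem_cons_of_mem _ hq, h1, h2⟩)
      · rintro (h | ⟨q, hq, h1, h2⟩)
        · exact Or.inl (Or.inl h)
        · rcases List.mem_cons.mp hq with rfl | hq
          · exact Or.inl (Or.inr h2)
          · exact Or.inr ⟨q, hq, h1, h2⟩

theorem pv_multi_iff (pp : List (Int × List Int)) (v : Int) :
    pvMulti pp v = true ↔ ∃ p ∈ pp, p.2.length ≠ 1 ∧ v ∈ p.2 := by
  simp [pvMulti]

theorem pv_later_iff (pp : List (Int × List Int)) (t : Nat) (v : Int) :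
    pvLater pp t v = true ↔ ∃ u, t < u ∧ u < pp.length ∧ pvOrig pp u = [v] := by
  simp [pvLater]
  constructor
  · rintro ⟨u, hu, h1, h2⟩; exact ⟨u, h1, hu, h2⟩
  · rintro ⟨u, h1, hu, h2⟩; exact ⟨u, hu, h1, h2⟩

theorem pv_any_congr {α : Type} (l : List α) (f g : α → Bool) (h : ∀ x ∈ l, f x = g x) :
    l.any f = l.any g := by
  induction l with
  | nil => rfl
  | cons a l ih => simp only [List.any_cons, h a (by simp), ih (fun x hx => h x (by simp [hx]))]

theorem pv_orig_append_lt {pp : List (Int × List Int)} (p : Int × List Int) {u : Nat}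
    (hu : u < pp.length) : pvOrig (pp ++ [p]) u = pvOrig pp u := by
  unfold pvOrig
  rw [List.map_append]
  exact List.getD_append _ _ _ _ (by simpa using hu)

theorem pv_orig_append_self {pp : List (Int × List Int)} (p : Int × List Int) :
    pvOrig (pp ++ [p]) pp.length = p.2 := by
  unfold pvOrig
  rw [List.map_append]
  simp [List.getD_eq_getElem?_getD]

theorem pv_later_append {pp : List (Int × List Int)} (p : Int × List Int) (t : Nat) (v : Int) :
    pvLater (pp ++ [p]) t v
      = (pvLater pp t v || (decide (t < pp.length) && (p.2 == [v]))) := by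
  unfold pvLater
  rw [show (pp ++ [p]).length = pp.length + 1 by simp, List.range_succ, List.any_append]
  congr 1
  · exact pv_any_congr _ _ _ (fun u hu => by
      rw [pv_orig_append_lt p (List.mem_range.mp hu)])
  · simp [pv_orig_append_self]

theorem pv_lastKey (pp : List (Int × List Int)) :
    pp.map Prod.fst = (List.range pp.length).map (fun (t : Nat) => (t : Int)) →
    ∀ (t : Nat) (v : Int), t < pp.length → pvOrig pp t = [v] →
    (((pp.foldl (fun d p => if p.2.length = 1 then PySem.Dict.insert d (p.2.headD 0) p.1 else d)
        PySem.Dict.empty).get? v ≠ some ((t : Int))) ↔ pvLater pp t v = true) := by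
  induction pp using List.reverseRecOn with
  | nil => intro _ t v ht; simp at ht
  | append_singleton pp p ih =>
    intro hk t v ht hv
    have hk2 : pp.map Prod.fst ++ [p.1]
        = (List.range pp.length).map (fun (t : Nat) => (t : Int)) ++ [(pp.length : Int)] := by
      simpa [List.range_succ] using hk
    obtain ⟨hk', hp1⟩ := List.append_inj' hk2 (by simp)
    have hp1 : p.1 = (pp.length : Int) := by simpa using hp1
    rw [List.foldl_append, List.foldl_cons, List.foldl_nil, pv_later_append]
    have ht' : t < pp.length + 1 := by simpa using ht
    by_cases h1 : p.2.length = 1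
    · simp only [if_pos h1]
      by_cases h2 : p.2.headD 0 = v
      · -- the appended pass is exactly [v]
        have hv2 : p.2 = [v] := by rw [pv_len_one h1, h2]
        rw [h2, PySem.Dict.get?_insert_self, hp1]
        rcases Nat.lt_or_ge t pp.length with htl | htl
        · simp [htl, hv2]
          omega
        · have hte : t = pp.length := by omega
          have hlf : pvLater pp t v = false := by
            rw [Bool.eq_false_iff]
            intro h
            obtain ⟨u, hu1, hu2, _⟩ := (pv_later_iff pp t v).mp h
            omega
          rw [hte] at hlf
          simp [hte, hlf]
      · -- the appended pass is a different singleton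
        have hne : v ≠ p.2.headD 0 := fun h => h2 h.symm
        rw [PySem.Dict.get?_insert_of_ne _ _ hne]
        have htl : t < pp.length := by
          rcases Nat.lt_or_ge t pp.length with h | h
          · exact h
          · exfalso
            have : t = pp.length := by omega
            subst this
            rw [pv_orig_append_self] at hv
            exact h2 (by rw [hv]; rfl)
        have hbe : (p.2 == [v]) = false := by
          rw [beq_eq_false_iff_ne]
          intro h; exact h2 (by rw [h]; rfl)
        rw [pv_orig_append_lt p htl] at hv
        simp only [hbe, Bool.and_false, Bool.or_false]
        exact ih hk' t v htl hv
    · simp only [if_neg h1]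
      have htl : t < pp.length := by
        rcases Nat.lt_or_ge t pp.length with h | h
        · exact h
        · exfalso
          have : t = pp.length := by omega
          subst this
          rw [pv_orig_append_self] at hv
          exact h1 (by rw [hv]; rfl)
      have hbe : (p.2 == [v]) = false := by
        rw [beq_eq_false_iff_ne]
        intro h; exact h1 (by rw [h]; rfl)
      rw [pv_orig_append_lt p htl] at hv
      simp only [hbe, Bool.and_false, Bool.or_false]
      exact ih hk' t v htl hv

theorem pv_getElem_eq {pp : List (Int × List Int)}
    (hk : pp.map Prod.fst = (List.range pp.length).map (fun (t : Nat) => (t : Int)))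
    {t : Nat} (ht : t < pp.length) : pp[t] = ((t : Int), pvOrig pp t) := by
  have hfst : pp[t].1 = (t : Int) := by
    have := List.getElem_of_eq hk (i := t) (by simpa using ht)
    simpa using this
  exact Prod.ext hfst (pv_orig_eq ht).symm

theorem pv_B_eq_spec (pp : List (Int × List Int)) (arb : Int)
    (hk : pp.map Prod.fst = (List.range pp.length).map (fun (t : Nat) => (t : Int))) :
    remove_redundant_single_node_passes_py_alt pp arb = pvSpec pp arb pp.length := by
  simp only [remove_redundant_single_node_passes_py_alt]
  apply List.ext_getElem (by simp [pvSpec])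
  intro t ht ht'
  have htn : t < pp.length := by simpa using ht
  simp only [List.getElem_map, pvSpec, List.getElem_range]
  rw [pv_getElem_eq hk htn]
  by_cases hlen : (pvOrig pp t).length = 1
  · have hov : pvOrig pp t = [(pvOrig pp t).headD 0] := pv_len_one hlen
    have hmu : PySem.Set.contains (pp.foldl stepB (PySem.Set.empty, PySem.Dict.empty)).1
        ((pvOrig pp t).headD 0) = pvMulti pp ((pvOrig pp t).headD 0) := by
      rw [pv_foldB_fst]
      apply Bool.coe_iff_coe.mp
      rw [PySem.Set.contains_iff, pv_mem_foldSet, pv_multi_iff]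
      simp [PySem.Set.empty]
    have hla : (PySem.Dict.get? (pp.foldl stepB (PySem.Set.empty, PySem.Dict.empty)).2
        ((pvOrig pp t).headD 0) != some ((t : Int))) = pvLater pp t ((pvOrig pp t).headD 0) := by
      rw [pv_foldB_snd]
      apply Bool.coe_iff_coe.mp
      rw [bne_iff_ne]
      exact pv_lastKey pp hk t ((pvOrig pp t).headD 0) htn hov
    dsimp only
    rw [hmu, hla]
    simp [hlen, pvVal, pvMark, htn]
    split <;> rfl
  · simp [hlen, pvVal, pvMark]

-- ---------- A side ----------

theorem pv_keys_spec (pp : List (Int × List Int)) (arb : Int) (m : Nat) :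
    (pvSpec pp arb m).map Prod.fst = (List.range pp.length).map (fun (t : Nat) => (t : Int)) := by
  simp [pvSpec, List.map_map]

theorem pv_getD_spec {pp : List (Int × List Int)} {arb : Int} {m : Nat}
    {d : PySem.Dict Int (List Int)} (hd : d.items = pvSpec pp arb m)
    {t : Nat} (ht : t < pp.length) :
    PySem.Dict.getD d ((t : Int)) [] = pvVal pp arb m t := by
  have hnd : d.keys.Nodup := by
    show (d.items.map Prod.fst).Nodup
    rw [hd, pv_keys_spec]; exact pv_nodup_cast_range _
  exact PySem.Dict.getD_of_mem_items d
    (by rw [hd]; exact List.mem_map_of_mem (by simpa using ht)) hnd []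

theorem pv_contains_spec {pp : List (Int × List Int)} {arb : Int} {m : Nat}
    {d : PySem.Dict Int (List Int)} (hd : d.items = pvSpec pp arb m)
    {t : Nat} (ht : t < pp.length) :
    PySem.Dict.contains d ((t : Int)) = true := by
  rw [PySem.Dict.contains_iff_mem_keys]
  show (t : Int) ∈ d.items.map Prod.fst
  rw [hd, pv_keys_spec]
  exact List.mem_map_of_mem (by simpa using ht)

theorem pv_val_ge {pp : List (Int × List Int)} {arb : Int} {m u : Nat} (h : m ≤ u) :
    pvVal pp arb m u = pvOrig pp u := by
  simp [pvVal, show ¬(u < m) by omega]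

theorem pv_val_succ_of_ne {pp : List (Int × List Int)} {arb : Int} {m t : Nat} (h : t ≠ m) :
    pvVal pp arb (m + 1) t = pvVal pp arb m t := by
  simp [pvVal, show (t < m + 1) ↔ (t < m) by omega]

theorem pv_spec_succ_nomark {pp : List (Int × List Int)} {arb : Int} {m : Nat}
    (h : pvMark pp m = false) : pvSpec pp arb (m + 1) = pvSpec pp arb m := by
  unfold pvSpec
  apply List.map_congr_left
  intro t _
  by_cases htm : t = m
  · subst htm; simp [pvVal, h]
  · rw [pv_val_succ_of_ne htm]

theorem pv_items_insert_spec {pp : List (Int × List Int)} {arb : Int} {m : Nat}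
    (hm : m < pp.length) {d : PySem.Dict Int (List Int)} (hd : d.items = pvSpec pp arb m)
    (hmark : pvMark pp m = true) :
    (PySem.Dict.insert d ((m : Int)) [arb, arb]).items = pvSpec pp arb (m + 1) := by
  rw [PySem.Dict.items_insert_of_contains d _ (pv_contains_spec hd hm), hd]
  unfold pvSpec
  rw [List.map_map]
  apply List.map_congr_left
  intro t ht
  by_cases htm : t = m
  · subst htm
    simp [pvVal, hmark]
  · have hbe : ((t : Int) == (m : Int)) = false := by
      rw [beq_eq_false_iff_ne]
      exact fun h => htm (by exact_mod_cast h)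
    simp only [Function.comp_apply, hbe, Bool.false_eq_true, if_false,
      pv_val_succ_of_ne htm]

theorem pv_val_contains (pp : List (Int × List Int)) (arb : Int) (m j : Nat)
    (hjm : j < m) (hm : m < pp.length)
    (hov : pvOrig pp m = [(pvOrig pp m).headD 0])
    (hva : (pvOrig pp m).headD 0 ≠ arb) :
    (pvVal pp arb m j).contains ((pvOrig pp m).headD 0)
      = (((pvOrig pp j).length != 1) && (pvOrig pp j).contains ((pvOrig pp m).headD 0)) := by
  unfold pvVal
  by_cases hmk : pvMark pp j = true
  · rw [if_pos (by simp [hmk, hjm])]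
    have hc : (([arb, arb] : List Int).contains ((pvOrig pp m).headD 0)) = false := by
      simpa using hva
    have h2 : ((pvOrig pp j).length != 1) = false := by
      simp only [pvMark, Bool.and_eq_true, beq_iff_eq] at hmk
      simp [hmk.1]
    rw [hc, h2, Bool.false_and]
  · have hmk' : pvMark pp j = false := Bool.eq_false_iff.mpr hmk
    rw [if_neg (by simp [hmk'])]
    by_cases hl : (pvOrig pp j).length = 1
    · have hw : pvOrig pp j = [(pvOrig pp j).headD 0] := pv_len_one hl
      have hne : (pvOrig pp j).headD 0 ≠ (pvOrig pp m).headD 0 := by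
        intro he
        have hlat : pvLater pp j ((pvOrig pp j).headD 0) = true :=
          (pv_later_iff _ _ _).mpr ⟨m, hjm, hm, by rw [he]; exact hov⟩
        exact hmk (by unfold pvMark; rw [hlat]; simp [hl])
      have h2 : ((pvOrig pp j).length != 1) = false := by simp [hl]
      rw [h2, Bool.false_and]
      have hnm : (pvOrig pp m).headD 0 ∉ pvOrig pp j := by
        rw [hw]
        simpa using Ne.symm hne
      simpa using hnm
    · have h2 : ((pvOrig pp j).length != 1) = true := by simp [hl]
      rw [h2, Bool.true_and]

theorem pv_stepA_spec (pp : List (Int × List Int)) (arb : Int)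
    (harb : ∀ p ∈ pp, p.2 ≠ [arb])
    (m : Nat) (hm : m < pp.length)
    (d : PySem.Dict Int (List Int)) (hd : d.items = pvSpec pp arb m) :
    (stepA arb d ((m : Int))).items = pvSpec pp arb (m + 1) := by
  have hdm : PySem.Dict.getD d ((m : Int)) [] = pvOrig pp m := by
    rw [pv_getD_spec hd hm]; exact pv_val_ge (le_refl m)
  simp only [stepA]
  rw [hdm]
  by_cases h1 : (pvOrig pp m).length = 1
  · rw [if_pos h1]
    have hov : pvOrig pp m = [(pvOrig pp m).headD 0] := pv_len_one h1
    have hva : (pvOrig pp m).headD 0 ≠ arb := by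
      obtain ⟨p, hp, he⟩ := pv_orig_mem hm
      intro h
      exact harb p hp (by rw [he, hov, h])
    rw [PySem.List.pyRange_zero_nat m, List.any_map]
    have hback : ((List.range m).any
          ((fun j => (PySem.Dict.getD d j []).contains ((pvOrig pp m).headD 0)) ∘ (fun (k : Nat) => (k : Int))))
        = ((List.range m).any
          (fun j => ((pvOrig pp j).length != 1) && (pvOrig pp j).contains ((pvOrig pp m).headD 0))) := by
      apply pv_any_congr
      intro j hj
      have hjm : j < m := List.mem_range.mp hj
      dsimp only [Function.comp_apply]
      rw [pv_getD_spec hd (by omega)]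
      exact pv_val_contains pp arb m j hjm hm hov hva
    rw [hback]
    by_cases hb : ((List.range m).any
        (fun j => ((pvOrig pp j).length != 1) && (pvOrig pp j).contains ((pvOrig pp m).headD 0))) = true
    · rw [if_pos hb, PySem.Dict.getD_insert_self,
        if_neg (show ¬(([arb, arb] : List Int).headD 0 ≠ arb) by simp)]
      apply pv_items_insert_spec hm hd
      have hmul : pvMulti pp ((pvOrig pp m).headD 0) = true := by
        rw [pv_multi_iff]
        obtain ⟨j, hj, hcond⟩ := List.any_eq_true.mp hb
        rw [Bool.and_eq_true] at hcond
        obtain ⟨hl, hc⟩ := hcond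
        have hjn : j < pp.length := by have := List.mem_range.mp hj; omega
        obtain ⟨p, hp, he⟩ := pv_orig_mem hjn
        exact ⟨p, hp, by rw [he]; simpa using hl, by rw [he]; simpa using hc⟩
      unfold pvMark
      rw [hmul]
      simp [h1]
    · rw [if_neg hb, hdm, if_pos hva]
      have hsize : PySem.Dict.size d = pp.length := by
        show d.items.length = pp.length
        rw [hd]; simp [pvSpec]
      rw [hsize]
      have hr2 : PySem.List.pyRange ((m : Int) + 1) ((pp.length : Int)) 1
          = (List.range (pp.length - (m + 1))).map (fun k => ((m + 1 + k : Nat) : Int)) := by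
        rw [PySem.List.pyRange_one]
        rw [show (((pp.length : Int)) - (((m : Int)) + 1)).toNat = pp.length - (m + 1) by omega]
        apply List.map_congr_left
        intro k _
        push_cast
        ring
      rw [hr2, List.any_map]
      have hfwd : ((List.range (pp.length - (m + 1))).any
            ((fun k => (PySem.Dict.getD d k []).contains ((pvOrig pp m).headD 0))
              ∘ (fun k => ((m + 1 + k : Nat) : Int))))
          = ((List.range (pp.length - (m + 1))).any
            (fun k => (pvOrig pp (m + 1 + k)).contains ((pvOrig pp m).headD 0))) := by
        apply pv_any_congr
        intro k hk
        have hkn : m + 1 + k < pp.length := by have := List.mem_range.mp hk; omega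
        dsimp only [Function.comp_apply]
        rw [pv_getD_spec hd hkn, pv_val_ge (by omega)]
      rw [hfwd]
      by_cases hf : ((List.range (pp.length - (m + 1))).any
          (fun k => (pvOrig pp (m + 1 + k)).contains ((pvOrig pp m).headD 0))) = true
      · rw [if_pos hf]
        apply pv_items_insert_spec hm hd
        obtain ⟨k, hk, hc⟩ := List.any_eq_true.mp hf
        have hkn : m + 1 + k < pp.length := by have := List.mem_range.mp hk; omega
        have hvin : (pvOrig pp m).headD 0 ∈ pvOrig pp (m + 1 + k) := by simpa using hc
        by_cases hl : (pvOrig pp (m + 1 + k)).length = 1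
        · have hsing : pvOrig pp (m + 1 + k) = [(pvOrig pp m).headD 0] := by
            have h := pv_len_one hl
            rw [h] at hvin
            simp only [List.mem_singleton] at hvin
            rw [h, ← hvin]
          have hlat : pvLater pp m ((pvOrig pp m).headD 0) = true :=
            (pv_later_iff _ _ _).mpr ⟨m + 1 + k, by omega, hkn, hsing⟩
          unfold pvMark
          rw [hlat]
          simp [h1]
        · have hmul : pvMulti pp ((pvOrig pp m).headD 0) = true := by
            rw [pv_multi_iff]
            obtain ⟨p, hp, he⟩ := pv_orig_mem hkn
            exact ⟨p, hp, by rw [he]; exact hl, by rw [he]; exact hvin⟩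
          unfold pvMark
          rw [hmul]
          simp [h1]
      · rw [if_neg hf, hd]
        refine (pv_spec_succ_nomark ?_).symm
        rw [Bool.eq_false_iff]
        intro hmk
        unfold pvMark at hmk
        rw [Bool.and_eq_true, Bool.or_eq_true] at hmk
        obtain ⟨-, hor⟩ := hmk
        rcases hor with hmul | hlat
        · obtain ⟨p, hp, hlp, hvp⟩ := (pv_multi_iff pp _).mp hmul
          obtain ⟨j, hjn, he⟩ := pv_mem_orig hp
          rcases lt_trichotomy j m with hj | hj | hj
          · refine hb (List.any_eq_true.mpr ⟨j, List.mem_range.mpr hj, ?_⟩)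
            rw [Bool.and_eq_true]
            exact ⟨by simp [he, hlp], by rw [he]; simpa using hvp⟩
          · subst hj
            rw [hov] at he
            exact hlp (by rw [← he]; rfl)
          · refine hf (List.any_eq_true.mpr ⟨j - (m + 1), List.mem_range.mpr (by omega), ?_⟩)
            rw [show m + 1 + (j - (m + 1)) = j by omega, he]
            simpa using hvp
        · obtain ⟨u, hum, hun, hue⟩ := (pv_later_iff pp m _).mp hlat
          refine hf (List.any_eq_true.mpr ⟨u - (m + 1), List.mem_range.mpr (by omega), ?_⟩)
          rw [show m + 1 + (u - (m + 1)) = u by omega, hue]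
          simp
  · rw [if_neg h1, hd]
    refine (pv_spec_succ_nomark ?_).symm
    unfold pvMark
    simp [h1]

theorem pv_loopA (pp : List (Int × List Int)) (arb : Int)
    (harb : ∀ p ∈ pp, p.2 ≠ [arb]) :
    ∀ (k m : Nat), m + k = pp.length →
      ∀ d : PySem.Dict Int (List Int), d.items = pvSpec pp arb m →
        (((List.range' m k).map (fun (t : Nat) => (t : Int))).foldl (stepA arb) d).items = pvSpec pp arb pp.length := by
  intro k
  induction k with
  | zero => intro m hmk d hd; simpa [← hmk] using hd
  | succ k ih =>
    intro m hmk d hd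
    rw [List.range'_succ, List.map_cons, List.foldl_cons]
    exact ih (m + 1) (by omega) _ (pv_stepA_spec pp arb harb m (by omega) d hd)

theorem pv_A_eq_spec (pp : List (Int × List Int)) (arb : Int)
    (hk : pp.map Prod.fst = (List.range pp.length).map (fun (t : Nat) => (t : Int)))
    (harb : ∀ p ∈ pp, p.2 ≠ [arb]) :
    remove_redundant_single_node_passes_py pp arb = pvSpec pp arb pp.length := by
  unfold remove_redundant_single_node_passes_py
  have hkeys : PySem.Dict.keys (PySem.Dict.mk pp) = (List.range pp.length).map (fun (t : Nat) => (t : Int)) := hk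
  have hinit : (PySem.Dict.mk pp).items = pvSpec pp arb 0 := by
    show pp = pvSpec pp arb 0
    conv_lhs => rw [pv_pp_eq hk]
    simp [pvSpec, pvVal]
  rw [hkeys, List.range_eq_range']
  exact pv_loopA pp arb harb pp.length 0 (by omega) _ hinit

-- ---------- the no-single-node-pass case ----------

theorem pv_nosingle_getD (d : PySem.Dict Int (List Int))
    (h : ∀ p ∈ d.items, p.2.length ≠ 1) (i : Int) :
    ¬ (PySem.Dict.getD d i ([] : List Int)).length = 1 := by
  rw [PySem.Dict.getD_eq_get?_getD]
  cases hg : PySem.Dict.get? d i with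
  | none => simp
  | some w =>
    have hm := PySem.Dict.mem_items_of_get?_eq_some d hg
    simpa using h _ hm

theorem pv_A_nosingle (pp : List (Int × List Int)) (arb : Int)
    (h : ∀ p ∈ pp, p.2.length ≠ 1) :
    remove_redundant_single_node_passes_py pp arb = pp := by
  unfold remove_redundant_single_node_passes_py
  suffices hs : ∀ ks : List Int, ((ks.foldl (stepA arb) (PySem.Dict.mk pp)).items) = pp by
    exact hs _
  intro ks
  induction ks with
  | nil => rfl
  | cons i ks ih =>
    rw [List.foldl_cons,
      show stepA arb (PySem.Dict.mk pp) i = PySem.Dict.mk pp by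
        unfold stepA
        rw [if_neg (pv_nosingle_getD _ (by exact h) i)]]
    exact ih

theorem pv_B_nosingle (pp : List (Int × List Int)) (arb : Int)
    (h : ∀ p ∈ pp, p.2.length ≠ 1) :
    remove_redundant_single_node_passes_py_alt pp arb = pp := by
  simp only [remove_redundant_single_node_passes_py_alt]
  trans (pp.map id)
  · apply List.map_congr_left
    intro p hp
    simp [h p hp]
  · exact List.map_id pp

-- ===== VERDICT (by name: the statement is the Claim_ definition above) =====
theorem remove_redundant_single_node_passes_py_spec : Claim_equal_remove_redundant_single_node_passes_py := by
  intro pp arb _ hpre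
  unfold Spec_remove_redundant_single_node_passes_py
  obtain ⟨harb, hcase⟩ := hpre
  rcases hcase with hk | ⟨-, hns⟩
  · rw [pv_A_eq_spec pp arb hk harb, pv_B_eq_spec pp arb hk]
  · rw [pv_A_nosingle pp arb hns, pv_B_nosingle pp arb hns]
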